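-- pv_equiv track=rewrite | github.com/aegabrielsen/WebAppProject | util/byte_formating.py | byte_chunk_print
-- ===== SOURCE A (Python) =====
-- def byte_chunk_print(list):
--     str = ''
--     for i, s in enumerate(list):
--         str += s
--         str += ' '
--         if (i + 1) % 4 == 0:
--             str += '\n'
--     return str
-- ===== SOURCE B (Python) =====
-- def byte_chunk_print(list):
--     pieces = []
--     for i in range(0, len(list), 4):
--         chunk = list[i:i+4]
--         piece = ''.join(s + ' ' for s in chunk)
--         if len(chunk) == 4:
--             piece += '\n'
--         pieces.append(piece)
--     return ''.join(pieces)
-- ===== Notes on version B (the rewrite author's own statement) =====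
-- stated objective: alternative
-- what changed: Replaces the flat enumerate-with-modulo accumulation by a two-level decomposition: slice the list into chunks of four, render each chunk as a joined piece (with a newline exactly when the chunk is complete), and join the pieces.
import Mathlib
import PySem

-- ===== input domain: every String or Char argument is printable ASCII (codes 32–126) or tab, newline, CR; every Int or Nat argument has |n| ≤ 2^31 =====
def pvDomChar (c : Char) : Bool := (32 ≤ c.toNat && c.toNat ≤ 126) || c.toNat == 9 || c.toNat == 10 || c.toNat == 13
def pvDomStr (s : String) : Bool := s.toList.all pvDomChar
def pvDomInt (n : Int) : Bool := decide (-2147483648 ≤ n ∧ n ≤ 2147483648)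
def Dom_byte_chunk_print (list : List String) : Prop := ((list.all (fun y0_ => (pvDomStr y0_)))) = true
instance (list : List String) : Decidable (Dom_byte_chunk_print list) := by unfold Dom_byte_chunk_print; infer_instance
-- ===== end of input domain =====

-- B re-decomposes A's flat indexed pass as chunks-of-four rendered and joined; same cost, different structure.

-- ===== PORT A =====
def byte_chunk_print (list : List String) : String :=
  (PySem.List.enumerate list 0).foldl
    (fun str p =>
      let str := str ++ p.2
      let str := str ++ " "
      if (p.1 + 1) % 4 == 0 then str ++ "\n" else str)
    ""

-- ===== PORT B =====
def bcpPiece (chunk : List String) : String :=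
  let piece := String.join (chunk.map (fun s => s ++ " "))
  if chunk.length == 4 then piece ++ "\n" else piece

def bcpPieces : List String → List String
  | [] => []
  | x :: xs => bcpPiece ((x :: xs).take 4) :: bcpPieces ((x :: xs).drop 4)
termination_by l => l.length
decreasing_by simp

def byte_chunk_print_alt (list : List String) : String :=
  String.join (bcpPieces list)

-- ===== PRECONDITION & SPEC =====
def Spec_byte_chunk_print (list : List String) (out : String) : Prop := out = byte_chunk_print_alt list
instance (list : List String) (out : String) : Decidable (Spec_byte_chunk_print list out) := by unfold Spec_byte_chunk_print; infer_instance

-- ===== CLAIM (what is proved, stated in full; the proofs are below) =====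
def Claim_equal_byte_chunk_print : Prop := ∀ (list : List String), Dom_byte_chunk_print list → Spec_byte_chunk_print list (byte_chunk_print list)

-- ===== LEMMAS AND PROOFS =====

theorem foldl_append_str (l : List String) (x : String) :
    List.foldl (fun r s => r ++ s) x l = x ++ List.foldl (fun r s => r ++ s) "" l := by
  induction l generalizing x with
  | nil => simp
  | cons y ys ih =>
    simp only [List.foldl]
    rw [ih (x ++ y), ih ("" ++ y)]
    simp [String.append_assoc]

theorem bcpPieces_nil : bcpPieces [] = [] := by rw [bcpPieces]

theorem bcpPieces_cons (x : String) (xs : List String) :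
    bcpPieces (x :: xs) = bcpPiece ((x :: xs).take 4) :: bcpPieces ((x :: xs).drop 4) := by
  rw [bcpPieces]

theorem bcp_main (n : Nat) : ∀ (xs : List String), xs.length ≤ n → ∀ (s : Int) (acc : String), s % 4 = 0 →
    (PySem.List.enumerate xs s).foldl
      (fun str p =>
        let str := str ++ p.2
        let str := str ++ " "
        if (p.1 + 1) % 4 == 0 then str ++ "\n" else str)
      acc = acc ++ String.join (bcpPieces xs) := by
  induction n with
  | zero =>
    intro xs hlen s acc hs
    have hx : xs = [] := List.eq_nil_of_length_eq_zero (Nat.le_zero.mp hlen)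
    subst hx
    simp [PySem.List.enumerate, bcpPieces_nil, String.join]
  | succ n ih =>
    intro xs hlen s acc hs
    match xs with
    | [] => simp [PySem.List.enumerate, bcpPieces_nil, String.join]
    | [a] =>
      have h1 : ¬ (4 ∣ s + 1) := by omega
      simp [PySem.List.enumerate_cons, PySem.List.enumerate_nil, bcpPieces_cons,
        bcpPieces_nil, bcpPiece, String.join, h1, String.append_assoc]
    | [a, b] =>
      have h1 : ¬ (4 ∣ s + 1) := by omega
      have h2 : ¬ (4 ∣ s + 1 + 1) := by omega
      simp [PySem.List.enumerate_cons, PySem.List.enumerate_nil, bcpPieces_cons,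
        bcpPieces_nil, bcpPiece, String.join, h1, h2, String.append_assoc]
    | [a, b, c] =>
      have h1 : ¬ (4 ∣ s + 1) := by omega
      have h2 : ¬ (4 ∣ s + 1 + 1) := by omega
      have h3 : ¬ (4 ∣ s + 1 + 1 + 1) := by omega
      simp [PySem.List.enumerate_cons, PySem.List.enumerate_nil, bcpPieces_cons,
        bcpPieces_nil, bcpPiece, String.join, h1, h2, h3, String.append_assoc]
    | a :: b :: c :: d :: rest =>
      have h1 : ¬ ((s + 1) % 4 = 0) := by omega
      have h2 : ¬ ((s + 1 + 1) % 4 = 0) := by omega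
      have h3 : ¬ ((s + 1 + 1 + 1) % 4 = 0) := by omega
      have h4 : ((s + 1 + 1 + 1 + 1) % 4 = 0) := by omega
      have hrest : rest.length ≤ n := by simp at hlen; omega
      have hrec := ih rest hrest (s + 1 + 1 + 1 + 1)
        (acc ++ (a ++ (" " ++ (b ++ (" " ++ (c ++ (" " ++ (d ++ (" " ++ "\n"))))))))) h4
      simp only [PySem.List.enumerate_cons, List.foldl, beq_iff_eq] at hrec ⊢
      simp only [if_neg h1, if_neg h2, if_neg h3, if_pos h4] at hrec ⊢
      simp only [String.append_assoc] at hrec ⊢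
      rw [hrec, bcpPieces_cons]
      simp only [bcpPiece, String.join, List.take, List.drop, List.map, List.length,
        String.append_assoc, List.foldl]
      conv_rhs => rw [foldl_append_str]
      simp [String.append_assoc]
      rw [← String.append_assoc]
      congr 1

-- ===== VERDICT (by name: the statement is the Claim_ definition above) =====
theorem byte_chunk_print_spec : Claim_equal_byte_chunk_print := by
  intro list _
  unfold Spec_byte_chunk_print byte_chunk_print byte_chunk_print_alt
  have h := bcp_main list.length list (le_refl _) 0 "" (by decide)
  simpa using h
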